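-- pv_equiv track=rewrite | github.com/oscarfabo93dev-tech/Autodiagn-sticoInclusi-nLaboralLGBTIQ- | src/quiz_logic.py | sections_to_improve
-- ===== SOURCE A (Python) =====
-- from typing import Dict, Any, List
--
-- def sections_to_improve(
--     answers: Dict[str, int], questions: List[Dict[str, Any]]
-- ) -> Dict[str, int]:
--     """
--     Identifica secciones con respuestas <= 2, para orientar recomendaciones.
--     Retorna {seccion: puntaje_min_detectado}
--     """
--     id_to_section = {q["id"]: q.get("section", "") for q in questions}
--     secc_low: Dict[str, int] = {}
--     for qid, score in answers.items():
--         sec = id_to_section.get(qid, "General")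
--         s = int(score)
--         if s <= 2:
--             prev = secc_low.get(sec, 3)
--             secc_low[sec] = min(prev, s)
--     return secc_low
-- ===== SOURCE B (Python) =====
-- from typing import Dict, Any, List
--
-- def sections_to_improve(
--     answers: Dict[str, int], questions: List[Dict[str, Any]]
-- ) -> Dict[str, int]:
--     # Gather-then-reduce: collect every low score per section, then take min per group.
--     id_to_section = {q["id"]: q.get("section", "") for q in questions}
--     groups: Dict[str, List[int]] = {}
--     for qid, score in answers.items():
--         s = int(score)
--         if s <= 2:
--             groups.setdefault(id_to_section.get(qid, "General"), []).append(s)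
--     return {sec: min(vals) for sec, vals in groups.items()}
-- ===== Notes on version B (the rewrite author's own statement) =====
-- stated objective: alternative
-- what changed: A maintains a running minimum per section with a sentinel default of 3; B gathers every low score into per-section lists in one pass (setdefault/append) and then takes min of each group in a final dict comprehension (gather-then-reduce).
import Mathlib
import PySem

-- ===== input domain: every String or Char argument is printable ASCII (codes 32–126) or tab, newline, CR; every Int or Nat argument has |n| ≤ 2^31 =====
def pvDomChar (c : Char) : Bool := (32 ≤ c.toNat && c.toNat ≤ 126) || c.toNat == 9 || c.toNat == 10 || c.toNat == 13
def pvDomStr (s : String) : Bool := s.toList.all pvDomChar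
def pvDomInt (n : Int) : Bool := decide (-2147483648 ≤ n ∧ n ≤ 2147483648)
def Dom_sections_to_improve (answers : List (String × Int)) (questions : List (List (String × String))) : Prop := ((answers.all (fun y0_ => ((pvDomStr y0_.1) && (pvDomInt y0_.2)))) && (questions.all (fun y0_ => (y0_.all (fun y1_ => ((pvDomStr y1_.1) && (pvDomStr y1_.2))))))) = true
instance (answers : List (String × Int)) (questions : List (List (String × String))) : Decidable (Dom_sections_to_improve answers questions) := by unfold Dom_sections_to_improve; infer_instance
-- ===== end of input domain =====

-- B replaces A's running-minimum-with-sentinel dict by gather-then-reduce (group all low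
-- scores per section, then take the min of each group); alternative decomposition, not faster.

-- ===== PORT A =====
-- id_to_section = {q["id"]: q.get("section", "") for q in questions}; the 'none' branch
-- (missing "id" key, Python KeyError) is excluded by Pre_ below.
def pvIdToSection (questions : List (List (String × String))) : PySem.Dict String String :=
  questions.foldl (fun d q =>
    match (PySem.Dict.ofList q).get? "id" with
    | some i => d.insert i ((PySem.Dict.ofList q).getD "section" "")
    | none   => d) PySem.Dict.empty

def sections_to_improve (answers : List (String × Int)) (questions : List (List (String × String))) : List (String × Int) :=
  let idToSection := pvIdToSection questions
  -- for qid, score in answers.items(): … running min with sentinel 3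
  let seccLow : PySem.Dict String Int :=
    (PySem.Dict.ofList answers).items.foldl (fun d p =>
      let sec := idToSection.getD p.1 "General"
      let s := p.2   -- int(score) on an int is the identity
      if s ≤ 2 then d.insert sec (min (d.getD sec 3) s) else d) PySem.Dict.empty
  seccLow.items

-- ===== PORT B =====
-- min(vals) on a nonempty list (Python raises on []; groups' values are never empty)
def pvMin : List Int → Int
  | [] => 0
  | x :: xs => xs.foldl min x

def sections_to_improve_alt (answers : List (String × Int)) (questions : List (List (String × String))) : List (String × Int) :=
  let idToSection := pvIdToSection questions
  -- groups.setdefault(sec, []).append(s)  ≡  Dict.modify sec [] (· ++ [s])  (exact: in-place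
  -- append for an existing key, a fresh key is appended at the end with value [s])
  let groups : PySem.Dict String (List Int) :=
    (PySem.Dict.ofList answers).items.foldl (fun g p =>
      let s := p.2
      if s ≤ 2 then g.modify (idToSection.getD p.1 "General") [] (· ++ [s]) else g)
      PySem.Dict.empty
  groups.items.map (fun kv => (kv.1, pvMin kv.2))

-- ===== PRECONDITION & SPEC =====
-- Pre_ excludes exactly the inputs on which A raises KeyError: a question dict without an "id" key.
def Pre_sections_to_improve (answers : List (String × Int)) (questions : List (List (String × String))) : Prop :=
  ∀ q ∈ questions, "id" ∈ q.map Prod.fst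
instance (answers : List (String × Int)) (questions : List (List (String × String))) : Decidable (Pre_sections_to_improve answers questions) := by unfold Pre_sections_to_improve; infer_instance

def pvWitness_sections_to_improve : (List (String × Int)) × (List (List (String × String))) :=
  ([("q1", 1), ("q2", 4)], [[("id", "q1"), ("section", "S")], [("id", "q2")]])

def Spec_sections_to_improve (answers : List (String × Int)) (questions : List (List (String × String))) (out : List (String × Int)) : Prop := out = sections_to_improve_alt answers questions
instance (answers : List (String × Int)) (questions : List (List (String × String))) (out : List (String × Int)) : Decidable (Spec_sections_to_improve answers questions out) := by unfold Spec_sections_to_improve; infer_instance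

-- ===== CLAIM (what is proved, stated in full; the proofs are below) =====
def Claim_equal_sections_to_improve : Prop := ∀ (answers : List (String × Int)) (questions : List (List (String × String))), Dom_sections_to_improve answers questions → Pre_sections_to_improve answers questions → Spec_sections_to_improve answers questions (sections_to_improve answers questions)

-- ===== LEMMAS AND PROOFS =====

-- the reduce step of B, as a map over a group dict's items
def pvMapMin (g : PySem.Dict String (List Int)) : PySem.Dict String Int :=
  PySem.Dict.mk (g.items.map (fun kv => (kv.1, pvMin kv.2)))

theorem pvMin_append (v : List Int) (hv : v ≠ []) (s : Int) :
    pvMin (v ++ [s]) = min (pvMin v) s := by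
  cases v with
  | nil => exact absurd rfl hv
  | cons x xs => simp [pvMin, List.foldl_append]

theorem pvMapMin_keys (g : PySem.Dict String (List Int)) :
    (pvMapMin g).keys = g.keys := by
  simp [pvMapMin, PySem.Dict.keys]

theorem pvMapMin_contains (g : PySem.Dict String (List Int)) (k : String) :
    (pvMapMin g).contains k = g.contains k := by
  rw [PySem.Dict.contains_eq_decide_mem_keys, PySem.Dict.contains_eq_decide_mem_keys, pvMapMin_keys]

-- in a list whose first components are distinct, two members with equal keys coincide
theorem pvEqOfNodupFst {α β : Type} (l : List (α × β))
    (h : (l.map Prod.fst).Nodup) {a b : α × β} (ha : a ∈ l) (hb : b ∈ l)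
    (hab : a.1 = b.1) : a = b := by
  induction l with
  | nil => cases ha
  | cons x xs ih =>
    simp only [List.map_cons, List.nodup_cons] at h
    rcases List.mem_cons.1 ha with ha1 | ha1 <;> rcases List.mem_cons.1 hb with hb1 | hb1
    · rw [ha1, hb1]
    · refine absurd ?_ h.1; rw [← ha1, hab]; exact List.mem_map_of_mem hb1
    · refine absurd ?_ h.1; rw [← hb1, ← hab]; exact List.mem_map_of_mem ha1
    · exact ih h.2 ha1 hb1

theorem pvStep (secK : String) (s : Int) (hs : s ≤ 2)
    (g : PySem.Dict String (List Int)) (hnd : g.keys.Nodup)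
    (hne : ∀ kv ∈ g.items, kv.2 ≠ []) :
    (pvMapMin g).insert secK (min ((pvMapMin g).getD secK 3) s)
      = pvMapMin (g.modify secK [] (· ++ [s])) := by
  have hmod : g.modify secK [] (· ++ [s]) = g.insert secK (g.getD secK [] ++ [s]) := rfl
  rw [hmod]
  by_cases hc : g.contains secK = true
  · -- existing key: in-place overwrite on both sides
    obtain ⟨v, hv⟩ : ∃ v, g.get? secK = some v := by
      rw [PySem.Dict.contains_eq_isSome_get?] at hc
      exact Option.isSome_iff_exists.1 hc
    have hitem : (secK, v) ∈ g.items := PySem.Dict.mem_items_of_get?_eq_some _ hv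
    have hvne : v ≠ [] := hne _ hitem
    have hgD : g.getD secK [] = v := PySem.Dict.getD_of_get?_eq_some _ _ hv
    have hmitem : (secK, pvMin v) ∈ (pvMapMin g).items := by
      simp only [pvMapMin]
      exact List.mem_map.2 ⟨(secK, v), hitem, rfl⟩
    have hmnd : (pvMapMin g).keys.Nodup := by rw [pvMapMin_keys]; exact hnd
    have hmD : (pvMapMin g).getD secK 3 = pvMin v :=
      PySem.Dict.getD_of_mem_items _ hmitem hmnd 3
    have hmc : (pvMapMin g).contains secK = true := by rw [pvMapMin_contains]; exact hc
    apply PySem.Dict.ext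
    rw [PySem.Dict.items_insert_of_contains _ _ hmc, hmD, hgD]
    simp only [pvMapMin, PySem.Dict.items_insert_of_contains _ _ hc, List.map_map]
    apply List.map_congr_left
    intro q hq
    by_cases hk : q.1 = secK
    · have : q = (secK, v) := pvEqOfNodupFst g.items hnd hq hitem hk
      subst this
      simp [Function.comp, pvMin_append v hvne s]
    · simp [Function.comp, hk]
  · -- fresh key: appended at the end on both sides
    have hc' : g.contains secK = false := by simpa using hc
    have hgD : g.getD secK [] = [] := PySem.Dict.getD_of_not_contains _ _ hc'
    have hmc : (pvMapMin g).contains secK = false := by rw [pvMapMin_contains]; exact hc'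
    have hmD : (pvMapMin g).getD secK 3 = 3 := PySem.Dict.getD_of_not_contains _ _ hmc
    have hmin : min (3 : Int) s = s := min_eq_right (by omega)
    apply PySem.Dict.ext
    rw [PySem.Dict.items_insert_of_not_contains _ _ hmc, hgD, hmD, hmin]
    simp [pvMapMin, PySem.Dict.items_insert_of_not_contains _ _ hc', pvMin]

-- the loop invariant: A's running-min dict tracks pvMapMin of B's group dict
theorem pvInv (secOf : String × Int → String) (l : List (String × Int))
    (g : PySem.Dict String (List Int)) (hnd : g.keys.Nodup)
    (hne : ∀ kv ∈ g.items, kv.2 ≠ []) :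
    l.foldl (fun d p =>
        let sec := secOf p
        let s := p.2
        if s ≤ 2 then d.insert sec (min (d.getD sec 3) s) else d) (pvMapMin g)
      = pvMapMin (l.foldl (fun g p =>
        let s := p.2
        if s ≤ 2 then g.modify (secOf p) [] (· ++ [s]) else g) g) := by
  induction l generalizing g with
  | nil => rfl
  | cons p rest ih =>
    simp only [List.foldl_cons]
    by_cases hs : p.2 ≤ 2
    · simp only [hs, if_pos]
      rw [pvStep (secOf p) p.2 hs g hnd hne]
      refine ih _ ?_ ?_
      · show (g.insert (secOf p) (g.getD (secOf p) [] ++ [p.2])).keys.Nodup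
        exact PySem.Dict.nodup_keys_insert _ _ _ hnd
      · intro kv hkv
        have : kv = (secOf p, g.getD (secOf p) [] ++ [p.2]) ∨ (kv ∈ g.items ∧ kv.1 ≠ secOf p) :=
          (PySem.Dict.mem_items_insert _ _ _ _).1 hkv
        rcases this with h1 | h1
        · rw [h1]; simp
        · exact hne _ h1.1
    · simp only [hs, if_neg, not_false_iff]
      exact ih g hnd hne

-- ===== VERDICT (by name: the statement is the Claim_ definition above) =====
theorem sections_to_improve_spec : Claim_equal_sections_to_improve := by
  intro answers questions _ _
  unfold Spec_sections_to_improve sections_to_improve sections_to_improve_alt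
  have h := pvInv (fun p => (pvIdToSection questions).getD p.1 "General")
    (PySem.Dict.ofList answers).items PySem.Dict.empty
    (by simp [PySem.Dict.empty, PySem.Dict.keys]) (by simp [PySem.Dict.empty])
  have hemp : pvMapMin PySem.Dict.empty = PySem.Dict.empty := rfl
  rw [hemp] at h
  simp only [] at h ⊢
  rw [h]
  rfl
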